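-- pv_equiv track=rewrite | github.com/ayoubzulfiqar/Leetcode-Medium | SpecialArrayII/special_array_ii.py | checkSpecialArray
-- ===== SOURCE A (Python) =====
-- def checkSpecialArray(nums: list[int], queries: list[list[int]]) -> list[bool]:
--     n = len(nums)
--
--     prefix_violations = [0] * n
--
--     for i in range(n - 1):
--         if (nums[i] % 2) == (nums[i+1] % 2):
--             prefix_violations[i+1] = prefix_violations[i] + 1
--         else:
--             prefix_violations[i+1] = prefix_violations[i]
--
--     results = []
--     for fromi, toi in queries:
--         num_violations_in_range = prefix_violations[toi] - prefix_violations[fromi]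
--
--         if num_violations_in_range == 0:
--             results.append(True)
--         else:
--             results.append(False)
--
--     return results
-- ===== SOURCE B (Python) =====
-- def checkSpecialArray(nums: list[int], queries: list[list[int]]) -> list[bool]:
--     # Run-start pointer: start[i] is the first index of the maximal alternating
--     # run containing i; two positions lie in a common special range iff their
--     # run starts coincide.
--     start = []
--     run_start = 0
--     prev = None
--     for i, x in enumerate(nums):
--         if prev is not None and x % 2 == prev % 2:
--             run_start = i
--         prev = x
--         start.append(run_start)
--     return [start[f] == start[t] for f, t in queries]
-- ===== Notes on version B (the rewrite author's own statement) =====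
-- stated objective: alternative
-- what changed: Replaces A's prefix-violation counter array and per-query subtraction with a run-start pointer array (leftmost index of the alternating run containing each position) answered by an equality test, built in one enumerate pass with a running pointer instead of index-assignments into a preallocated array.
import Mathlib
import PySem

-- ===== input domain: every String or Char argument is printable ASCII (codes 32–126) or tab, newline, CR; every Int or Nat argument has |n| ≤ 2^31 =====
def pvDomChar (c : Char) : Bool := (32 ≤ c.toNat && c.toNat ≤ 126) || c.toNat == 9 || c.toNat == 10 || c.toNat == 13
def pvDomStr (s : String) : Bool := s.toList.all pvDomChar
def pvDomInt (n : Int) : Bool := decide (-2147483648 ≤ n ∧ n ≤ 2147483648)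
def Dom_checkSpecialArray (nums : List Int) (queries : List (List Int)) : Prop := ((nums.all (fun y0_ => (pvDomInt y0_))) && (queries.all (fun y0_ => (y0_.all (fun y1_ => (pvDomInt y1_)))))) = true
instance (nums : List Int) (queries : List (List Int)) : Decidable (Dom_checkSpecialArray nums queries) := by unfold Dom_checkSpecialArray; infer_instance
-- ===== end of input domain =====

-- B replaces A's prefix-violation counts and per-query subtraction by a run-start
-- pointer array answered with an equality test (objective: alternative decomposition).

-- ===== PORT A =====
-- the body of A's loop over range(n-1)
def stepA (nums : List Int) (pv : List Int) (i : Int) : List Int :=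
  if PySem.Int.mod (PySem.List.pyGetD nums i 0) 2
       = PySem.Int.mod (PySem.List.pyGetD nums (i + 1) 0) 2 then
    PySem.List.pySetD pv (i + 1) (PySem.List.pyGetD pv i 0 + 1)
  else
    PySem.List.pySetD pv (i + 1) (PySem.List.pyGetD pv i 0)

def checkSpecialArray (nums : List Int) (queries : List (List Int)) : List Bool :=
  let n : Int := (nums.length : Int)
  let pv : List Int :=
    (PySem.List.pyRange 0 (n - 1) 1).foldl (stepA nums) (List.replicate nums.length 0)
  queries.foldl (fun results q =>
    match q with
    | [fromi, toi] =>
        if PySem.List.pyGetD pv toi 0 - PySem.List.pyGetD pv fromi 0 = 0 then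
          results ++ [true]
        else
          results ++ [false]
    | _ => results)  -- 'fromi, toi = q' raises in Python for arity ≠ 2; excluded by Pre_
    []

-- ===== PORT B =====
def checkSpecialArray_alt (nums : List Int) (queries : List (List Int)) : List Bool :=
  let st : List Int :=
    ((PySem.List.enumerate nums 0).foldl
      (fun (s : Int × Option Int × List Int) ix =>
        let rs : Int :=
          match s.2.1 with
          | some p => if PySem.Int.mod ix.2 2 = PySem.Int.mod p 2 then ix.1 else s.1
          | none => s.1
        (rs, some ix.2, s.2.2 ++ [rs]))
      (0, none, [])).2.2
  queries.map (fun q =>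
    -- 'f, t = q' unpacking: arity test + component reads (arity ≠ 2 raises in Python; excluded by Pre_)
    if q.length = 2 then
      decide (PySem.List.pyGetD st (q.getD 0 0) 0 = PySem.List.pyGetD st (q.getD 1 0) 0)
    else false)

-- ===== PRECONDITION & SPEC =====
-- Pre_ excludes exactly the inputs where Python A raises: a query that is not a
-- 2-element list (ValueError on unpacking) or whose indices are out of range
-- for nums (IndexError).
def Pre_checkSpecialArray (nums : List Int) (queries : List (List Int)) : Prop :=
  ∀ q ∈ queries, q.length = 2 ∧
    (-(nums.length : Int) ≤ q.getD 0 0 ∧ q.getD 0 0 < (nums.length : Int)) ∧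
    (-(nums.length : Int) ≤ q.getD 1 0 ∧ q.getD 1 0 < (nums.length : Int))
instance (nums : List Int) (queries : List (List Int)) : Decidable (Pre_checkSpecialArray nums queries) := by
  unfold Pre_checkSpecialArray; infer_instance

def pvWitness_checkSpecialArray : List Int × List (List Int) :=
  ([1, 2, 1, 1], [[0, 2], [1, 3], [-4, -1], [2, 2]])

def Spec_checkSpecialArray (nums : List Int) (queries : List (List Int)) (out : List Bool) : Prop := out = checkSpecialArray_alt nums queries
instance (nums : List Int) (queries : List (List Int)) (out : List Bool) : Decidable (Spec_checkSpecialArray nums queries out) := by unfold Spec_checkSpecialArray; infer_instance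

-- ===== CLAIM (what is proved, stated in full; the proofs are below) =====
def Claim_equal_checkSpecialArray : Prop := ∀ (nums : List Int) (queries : List (List Int)), Dom_checkSpecialArray nums queries → Pre_checkSpecialArray nums queries → Spec_checkSpecialArray nums queries (checkSpecialArray nums queries)

-- ===== LEMMAS AND PROOFS =====

-- violation flag between positions k and k+1
def vio (nums : List Int) (k : Nat) : Bool :=
  decide (PySem.Int.mod (nums.getD k 0) 2 = PySem.Int.mod (nums.getD (k + 1) 0) 2)

-- prefix-violation count (A's array, as a function)
def Pfun (v : Nat → Bool) : Nat → Int
  | 0 => 0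
  | i + 1 => Pfun v i + (if v i then 1 else 0)

-- run-start pointer (B's array, as a function)
def Sfun (v : Nat → Bool) : Nat → Int
  | 0 => 0
  | i + 1 => if v i then (i : Int) + 1 else Sfun v i

theorem Sfun_le (v : Nat → Bool) (i : Nat) : Sfun v i ≤ (i : Int) := by
  induction i with
  | zero => simp [Sfun]
  | succ i ih => simp only [Sfun]; split <;> push_cast <;> omega

theorem Pfun_mono (v : Nat → Bool) {i j : Nat} (h : i ≤ j) : Pfun v i ≤ Pfun v j := by
  induction j with
  | zero => simp_all
  | succ j ih =>
    rcases Nat.le_succ_iff.mp h with h' | h'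
    · have := ih h'
      simp only [Pfun]; split <;> omega
    · subst h'; rfl

theorem PS_le (v : Nat → Bool) {i j : Nat} (h : i ≤ j) :
    (Pfun v i = Pfun v j ↔ Sfun v i = Sfun v j) := by
  induction j with
  | zero => have : i = 0 := Nat.le_zero.mp h; subst this; exact Iff.rfl
  | succ j ih =>
    rcases Nat.le_succ_iff.mp h with h' | h'
    · have hP1 := Pfun_mono v h'
      have hSi := Sfun_le v i
      have hij : (i : Int) ≤ (j : Int) := by exact_mod_cast h'
      have ePj : Pfun v (j + 1) = Pfun v j + (if v j then 1 else 0) := rfl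
      have eSj : Sfun v (j + 1) = if v j then (j : Int) + 1 else Sfun v j := rfl
      by_cases hv : v j = true
      · rw [ePj, eSj]; simp only [hv, if_true]
        constructor <;> intro he <;> omega
      · rw [ePj, eSj]; simp only [hv]
        simpa using ih h'
    · subst h'; exact ⟨fun _ => rfl, fun _ => rfl⟩

theorem PS_iff (v : Nat → Bool) (i j : Nat) :
    (Pfun v i = Pfun v j ↔ Sfun v i = Sfun v j) := by
  rcases le_total i j with h | h
  · exact PS_le v h
  · exact ⟨fun h' => ((PS_le v h).mp h'.symm).symm, fun h' => ((PS_le v h).mpr h'.symm).symm⟩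

-- A's loop body, on an in-range Nat index, is a set of index m+1
theorem stepA_eq (nums L : List Int) (m : Nat) :
    stepA nums L (m : Int) = L.set (m + 1) (L.getD m 0 + if vio nums m then 1 else 0) := by
  unfold stepA vio
  have h1 : ((m : Int) + 1) = (((m + 1 : Nat)) : Int) := by push_cast; ring
  rw [h1]
  simp only [PySem.List.pyGetD_natCast, PySem.List.pySetD_natCast, decide_eq_true_eq]
  split
  · rfl
  · rw [add_zero]

-- characterization of A's prefix array
theorem foldA_char (nums : List Int) (m : Nat) (hm : m + 1 ≤ nums.length) :
    ((PySem.List.pyRange 0 (m : Int) 1).foldl (stepA nums) (List.replicate nums.length 0)).length = nums.length ∧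
      ∀ k : Nat, k < nums.length →
        ((PySem.List.pyRange 0 (m : Int) 1).foldl (stepA nums) (List.replicate nums.length 0)).getD k 0
          = if k ≤ m then Pfun (vio nums) k else 0 := by
  induction m with
  | zero =>
    rw [show ((0 : Nat) : Int) = 0 by norm_num, PySem.List.pyRange_one_eq_nil le_rfl]
    simp only [List.foldl_nil]
    refine ⟨by simp, fun k hk => ?_⟩
    rw [List.getD_eq_getElem _ _ (by simpa using hk)]
    simp only [List.getElem_replicate]
    split
    · next h => interval_cases k; rfl
    · rfl
  | succ m ih =>
    obtain ⟨ihlen, ihget⟩ := ih (by omega)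
    have hsplit : PySem.List.pyRange 0 (((m + 1 : Nat)) : Int) 1
        = PySem.List.pyRange 0 ((m : Nat) : Int) 1 ++ [(m : Int)] := by
      push_cast
      exact PySem.List.pyRange_one_succ_right (by positivity)
    rw [hsplit, List.foldl_append, List.foldl_cons, List.foldl_nil, stepA_eq]
    set L := (PySem.List.pyRange 0 ((m : Nat) : Int) 1).foldl (stepA nums) (List.replicate nums.length 0) with hLdef
    have hgm : L.getD m 0 = Pfun (vio nums) m := by rw [ihget m (by omega)]; simp
    refine ⟨by rw [List.length_set]; exact ihlen, fun k hk => ?_⟩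
    have hklen : k < (L.set (m + 1) (L.getD m 0 + if vio nums m then 1 else 0)).length := by
      rw [List.length_set, ihlen]; exact hk
    rw [List.getD_eq_getElem _ _ hklen, List.getElem_set]
    by_cases hk1 : m + 1 = k
    · subst hk1
      rw [if_pos rfl, hgm, if_pos (Nat.le_refl (m + 1))]
      rfl
    · rw [if_neg hk1, ← List.getD_eq_getElem _ _ (by rw [ihlen]; exact hk), ihget k hk]
      split_ifs <;> first | rfl | omega

-- structural rendering of B's loop
def buildS (nums : List Int) : List Int → Int → Int → Option Int → List Int
  | [], _, _, _ => []
  | x :: xs, i, runStart, prev =>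
      let rs : Int :=
        match prev with
        | some p => if PySem.Int.mod x 2 = PySem.Int.mod p 2 then i else runStart
        | none => runStart
      rs :: buildS nums xs (i + 1) rs (some x)

theorem foldB_eq (nums : List Int) (xs : List Int) (i rs : Int) (prev : Option Int) (acc : List Int) :
    ((PySem.List.enumerate xs i).foldl
      (fun (s : Int × Option Int × List Int) ix =>
        let r : Int :=
          match s.2.1 with
          | some p => if PySem.Int.mod ix.2 2 = PySem.Int.mod p 2 then ix.1 else s.1
          | none => s.1
        (r, some ix.2, s.2.2 ++ [r]))
      (rs, prev, acc)).2.2 = acc ++ buildS nums xs i rs prev := by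
  induction xs generalizing i rs prev acc with
  | nil => simp [PySem.List.enumerate_nil, buildS]
  | cons x xs ih =>
    rw [PySem.List.enumerate_cons, List.foldl_cons]
    simp only [buildS]
    rw [ih]
    simp [List.append_assoc]

theorem buildS_char (nums : List Int) :
    ∀ (xs : List Int) (m : Nat), nums.drop m = xs →
      buildS nums xs (m : Int) (Sfun (vio nums) (m - 1))
          (if m = 0 then none else some (nums.getD (m - 1) 0))
        = (List.range (nums.length - m)).map (fun k => Sfun (vio nums) (m + k)) := by
  intro xs
  induction xs with
  | nil =>
    intro m hm
    have : nums.length ≤ m := List.drop_eq_nil_iff.mp hm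
    rw [show nums.length - m = 0 by omega]
    simp [buildS]
  | cons x xs ih =>
    intro m hm
    have hmlt : m < nums.length := by
      by_contra hc
      rw [List.drop_eq_nil_iff.mpr (by omega)] at hm
      exact List.cons_ne_nil x xs hm.symm
    have hx : nums.getD m 0 = x := by
      have h0 : (nums.drop m)[0]'(by rw [hm]; simp) = x := by simp [hm]
      rw [List.getElem_drop] at h0
      rw [List.getD_eq_getElem _ _ hmlt]
      simpa using h0
    have hrs : (match (if m = 0 then none else some (nums.getD (m - 1) 0)) with
        | some p => if PySem.Int.mod x 2 = PySem.Int.mod p 2 then (m : Int) else Sfun (vio nums) (m - 1)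
        | none => Sfun (vio nums) (m - 1)) = Sfun (vio nums) m := by
      cases m with
      | zero => simp
      | succ m' =>
        simp only [Nat.succ_ne_zero, if_false, Nat.add_sub_cancel]
        have : Sfun (vio nums) (m' + 1)
            = if vio nums m' then (m' : Int) + 1 else Sfun (vio nums) m' := rfl
        rw [this]
        unfold vio
        rw [← hx]
        simp only [decide_eq_true_eq]
        by_cases hc : PySem.Int.mod (nums.getD (m' + 1) 0) 2 = PySem.Int.mod (nums.getD m' 0) 2
        · rw [if_pos hc, if_pos hc.symm]
          push_cast; ring
        · rw [if_neg hc, if_neg (fun h => hc h.symm)]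
    have hdrop : nums.drop (m + 1) = xs := by
      have := congrArg List.tail hm
      simpa [List.tail_drop] using this
    have hrec := ih (m + 1) hdrop
    rw [if_neg (Nat.succ_ne_zero m)] at hrec
    simp only [Nat.add_sub_cancel] at hrec
    show (match (if m = 0 then none else some (nums.getD (m - 1) 0)) with
        | some p => if PySem.Int.mod x 2 = PySem.Int.mod p 2 then (m : Int) else Sfun (vio nums) (m - 1)
        | none => Sfun (vio nums) (m - 1)) ::
        buildS nums xs ((m : Int) + 1) _ (some x) = _
    rw [hrs, show ((m : Int) + 1) = (((m + 1 : Nat)) : Int) by push_cast; ring, ← hx, hrec]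
    rw [show nums.length - m = (nums.length - (m + 1)) + 1 by omega, List.range_succ_eq_map]
    simp only [List.map_cons, List.map_map, Nat.add_zero]
    congr 1
    apply List.map_congr_left
    intro k _
    simp only [Function.comp]
    congr 1
    omega

-- total index normalization under InRange
theorem pyGetD_norm (L : List Int) (i : Int) (h1 : -(L.length : Int) ≤ i) (h2 : i < (L.length : Int)) :
    PySem.List.pyGetD L i 0 = L.getD ((if i < 0 then i + L.length else i)).toNat 0 := by
  by_cases hneg : i < 0
  · have hk1 : 0 < (-i).toNat := by omega
    have hk2 : (-i).toNat ≤ L.length := by omega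
    have hi : i = -(((-i).toNat : Nat) : Int) := by omega
    rw [hi, PySem.List.pyGetD_neg_natCast _ _ _ hk1 hk2]
    rw [if_pos (by omega : -(((-i).toNat : Nat) : Int) < 0)]
    have : (-(((-i).toNat : Nat) : Int) + ↑L.length).toNat = L.length - (-i).toNat := by omega
    rw [this, List.getD_eq_getElem _ _ (by omega)]
  · have h0 : 0 ≤ i := by omega
    rw [PySem.List.pyGetD_eq_getElem (h0 := h0) (h1 := h2), if_neg hneg,
      List.getD_eq_getElem _ _ (by omega)]

-- Python index normalization used for both ports' array reads
def pyIdx (n : Nat) (i : Int) : Nat := (if i < 0 then i + n else i).toNat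

theorem pyIdx_lt (n : Nat) (i : Int) (h1 : -(n : Int) ≤ i) (h2 : i < (n : Int)) :
    pyIdx n i < n := by
  unfold pyIdx; split <;> omega

theorem pyGetD_norm' (L : List Int) (n : Nat) (i : Int) (hlen : L.length = n)
    (h1 : -(n : Int) ≤ i) (h2 : i < (n : Int)) :
    PySem.List.pyGetD L i 0 = L.getD (pyIdx n i) 0 := by
  subst hlen
  exact pyGetD_norm L i h1 h2

-- the two query loops agree elementwise, given the array characterizations
theorem queries_eq (v : Nat → Bool) (n : Nat) (pv st : List Int)
    (hpvl : pv.length = n) (hstl : st.length = n)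
    (hpv : ∀ k, k < n → pv.getD k 0 = Pfun v k)
    (hst : ∀ k, k < n → st.getD k 0 = Sfun v k) :
    ∀ (qs : List (List Int)) (acc : List Bool),
      (∀ q ∈ qs, q.length = 2 ∧
        (-(n : Int) ≤ q.getD 0 0 ∧ q.getD 0 0 < (n : Int)) ∧
        (-(n : Int) ≤ q.getD 1 0 ∧ q.getD 1 0 < (n : Int))) →
      qs.foldl (fun results q =>
        match q with
        | [fromi, toi] =>
            if PySem.List.pyGetD pv toi 0 - PySem.List.pyGetD pv fromi 0 = 0 then
              results ++ [true]
            else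
              results ++ [false]
        | _ => results) acc
      = acc ++ qs.map (fun q =>
          if q.length = 2 then
            decide (PySem.List.pyGetD st (q.getD 0 0) 0 = PySem.List.pyGetD st (q.getD 1 0) 0)
          else false) := by
  intro qs
  induction qs with
  | nil => intro acc _; simp
  | cons q qs ih =>
    intro acc hall
    obtain ⟨hq2, ⟨hf1, hf2⟩, ⟨ht1, ht2⟩⟩ := hall q (List.mem_cons_self ..)
    match q, hq2 with
    | [f, t], _ =>
      simp only [List.getD_eq_getElem?_getD, List.getElem?_cons_zero, List.getElem?_cons_succ,
        Option.getD_some] at hf1 hf2 ht1 ht2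
      rw [List.foldl_cons, List.map_cons]
      dsimp only
      have hfi := pyIdx_lt n f hf1 hf2
      have hti := pyIdx_lt n t ht1 ht2
      have hA : PySem.List.pyGetD pv t 0 - PySem.List.pyGetD pv f 0 = 0
          ↔ Pfun v (pyIdx n t) = Pfun v (pyIdx n f) := by
        rw [pyGetD_norm' pv n t hpvl ht1 ht2, pyGetD_norm' pv n f hpvl hf1 hf2,
          hpv _ hti, hpv _ hfi]
        omega
      have hB : (PySem.List.pyGetD st f 0 = PySem.List.pyGetD st t 0)
          ↔ Sfun v (pyIdx n f) = Sfun v (pyIdx n t) := by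
        rw [pyGetD_norm' st n t hstl ht1 ht2, pyGetD_norm' st n f hstl hf1 hf2,
          hst _ hti, hst _ hfi]
      have hiff : (PySem.List.pyGetD pv t 0 - PySem.List.pyGetD pv f 0 = 0)
          ↔ (PySem.List.pyGetD st f 0 = PySem.List.pyGetD st t 0) := by
        rw [hA, hB, ← PS_iff v (pyIdx n f) (pyIdx n t)]
        exact eq_comm
      by_cases hc : PySem.List.pyGetD pv t 0 - PySem.List.pyGetD pv f 0 = 0
      · rw [if_pos hc, ih (acc ++ [true]) (fun q hq => hall q (List.mem_cons_of_mem _ hq)),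
          List.append_assoc]
        simp [decide_eq_true (hiff.mp hc)]
      · rw [if_neg hc, ih (acc ++ [false]) (fun q hq => hall q (List.mem_cons_of_mem _ hq)),
          List.append_assoc]
        simp [decide_eq_false (fun h => hc (hiff.mpr h))]

-- B's start array, fully characterized
theorem st_char (nums : List Int) :
    ((PySem.List.enumerate nums 0).foldl
      (fun (s : Int × Option Int × List Int) ix =>
        let rs : Int :=
          match s.2.1 with
          | some p => if PySem.Int.mod ix.2 2 = PySem.Int.mod p 2 then ix.1 else s.1
          | none => s.1
        (rs, some ix.2, s.2.2 ++ [rs]))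
      (0, none, [])).2.2
    = (List.range nums.length).map (fun k => Sfun (vio nums) k) := by
  rw [foldB_eq nums nums 0 0 none []]
  have h := buildS_char nums nums 0 rfl
  simp only [Nat.cast_zero, Nat.sub_zero, Nat.zero_sub] at h
  rw [List.nil_append]
  have h0 : Sfun (vio nums) 0 = 0 := rfl
  rw [← h0] at *
  convert h using 2
  funext k
  rw [Nat.zero_add]

-- ===== VERDICT (by name: the statement is the Claim_ definition above) =====
theorem checkSpecialArray_spec : Claim_equal_checkSpecialArray := by
  intro nums queries _ hpre
  unfold Spec_checkSpecialArray checkSpecialArray checkSpecialArray_alt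
  rw [st_char nums]
  dsimp only
  rcases Nat.eq_zero_or_pos nums.length with hn | hn
  · -- empty nums: Pre_ forces queries to be empty
    cases queries with
    | nil => simp
    | cons q qs =>
      exfalso
      obtain ⟨_, ⟨h1, h2⟩, _⟩ := hpre q (List.mem_cons_self ..)
      rw [hn] at h1 h2
      omega
  · have hcast : (nums.length : Int) - 1 = ((nums.length - 1 : Nat) : Int) := by omega
    rw [hcast]
    obtain ⟨hlen, hget⟩ := foldA_char nums (nums.length - 1) (by omega)
    refine (queries_eq (vio nums) nums.length _ _ hlen (by simp) ?_ ?_ queries [] hpre).trans (List.nil_append _)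
    · intro k hk
      rw [hget k hk, if_pos (by omega)]
    · intro k hk
      rw [List.getD_eq_getElem _ _ (by simpa using hk)]
      simp
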